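-- pv_equiv track=rewrite | github.com/nicsuzor/academicOps | scripts/sync_web_bundle.py | _extract_aops_logic
-- ===== SOURCE A (Python) =====
-- def _extract_aops_logic(hook_content: str) -> str:
--     """Extract the logic portion of the aOps hook (skip shebang for appending)."""
--     lines = hook_content.split("\n")
--     # Skip shebang and initial comments when appending to existing hook
--     logic_lines = []
--     in_logic = False
--     for line in lines:
--         if line.startswith("#!"):
--             continue  # Skip shebang
--         if not in_logic and line.startswith("#"):
--             continue  # Skip header comments
--         if not in_logic and line.strip() == "":
--             continue  # Skip initial blank lines
--         in_logic = True
--         logic_lines.append(line)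
--     return "\n".join(logic_lines)
-- ===== SOURCE B (Python) =====
-- def _extract_aops_logic(hook_content: str) -> str:
--     """Extract the logic portion of the aOps hook (skip shebang for appending)."""
--     lines = hook_content.split("\n")
--     # Phase 1: advance past the leading header (comments / shebang / blank lines)
--     i = 0
--     while i < len(lines) and (lines[i].startswith("#") or lines[i].strip() == ""):
--         i += 1
--     # Phase 2: keep the remainder, dropping any shebang lines anywhere in it
--     return "\n".join(l for l in lines[i:] if not l.startswith("#!"))
-- ===== Notes on version B (the rewrite author's own statement) =====
-- stated objective: simpler
-- what changed: Replaces A's single flag-driven loop with two phases: an index scan that skips the leading comment/blank header, then a join of the remaining suffix filtering out shebang lines.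
import Mathlib
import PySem

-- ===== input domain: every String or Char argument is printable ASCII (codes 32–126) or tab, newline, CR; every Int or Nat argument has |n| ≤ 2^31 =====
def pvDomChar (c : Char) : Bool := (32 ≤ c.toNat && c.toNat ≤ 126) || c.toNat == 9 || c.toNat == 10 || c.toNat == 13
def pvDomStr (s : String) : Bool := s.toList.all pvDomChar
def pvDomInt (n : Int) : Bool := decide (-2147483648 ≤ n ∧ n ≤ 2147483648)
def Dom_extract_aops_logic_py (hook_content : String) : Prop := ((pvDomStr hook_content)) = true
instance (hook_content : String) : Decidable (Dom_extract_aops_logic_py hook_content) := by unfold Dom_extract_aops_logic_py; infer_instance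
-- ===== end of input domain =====

-- B replaces A's flag-driven single loop by two phases (skip the leading comment/blank
-- header, then filter shebang lines from the remainder); objective: simpler.


-- ===== PORT A =====
-- A's for-loop over lines with the in_logic flag and the logic_lines accumulator
def pvALoop (lines : List String) (in_logic : Bool) (logic_lines : List String) : List String :=
  match lines with
  | [] => logic_lines
  | line :: rest =>
    if PySem.Str.startswith line "#!" then pvALoop rest in_logic logic_lines
    else if !in_logic && PySem.Str.startswith line "#" then pvALoop rest in_logic logic_lines
    else if !in_logic && (PySem.Str.strip line == "") then pvALoop rest in_logic logic_lines
    else pvALoop rest true (logic_lines ++ [line])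

def extract_aops_logic_py (hook_content : String) : String :=
  PySem.Str.join "\n" (pvALoop ((PySem.Str.split? hook_content "\n").getD []) false [])

-- ===== PORT B =====
-- the while loop advancing i past the header, expressed on the suffix lines[i:]
def pvSkipHeader (lines : List String) : List String :=
  match lines with
  | [] => []
  | l :: rest =>
    if PySem.Str.startswith l "#" || (PySem.Str.strip l == "") then pvSkipHeader rest
    else l :: rest

def extract_aops_logic_py_alt (hook_content : String) : String :=
  PySem.Str.join "\n"
    ((pvSkipHeader ((PySem.Str.split? hook_content "\n").getD [])).filter
      (fun l => !PySem.Str.startswith l "#!"))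

-- ===== PRECONDITION & SPEC =====
def Spec_extract_aops_logic_py (hook_content : String) (out : String) : Prop := out = extract_aops_logic_py_alt hook_content
instance (hook_content : String) (out : String) : Decidable (Spec_extract_aops_logic_py hook_content out) := by unfold Spec_extract_aops_logic_py; infer_instance

-- ===== CLAIM (what is proved, stated in full; the proofs are below) =====
def Claim_equal_extract_aops_logic_py : Prop := ∀ (hook_content : String), Dom_extract_aops_logic_py hook_content → Spec_extract_aops_logic_py hook_content (extract_aops_logic_py hook_content)

-- ===== LEMMAS AND PROOFS =====

-- a line starting with "#!" starts with "#"
theorem pv_shebang_hash (l : String) (h : PySem.Str.startswith l "#!" = true) :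
    PySem.Str.startswith l "#" = true := by
  simp only [PySem.Str.startswith_eq] at h ⊢
  rw [PySem.Chars.startswith_iff] at h ⊢
  exact List.IsPrefix.trans ⟨['!'], rfl⟩ h

theorem pvALoop_true (lines : List String) (acc : List String) :
    pvALoop lines true acc = acc ++ lines.filter (fun l => !PySem.Str.startswith l "#!") := by
  induction lines generalizing acc with
  | nil => simp [pvALoop]
  | cons l rest ih =>
    by_cases h : PySem.Chars.startswith l.toList ['#', '!'] = true <;>
      simp [pvALoop, h, ih, List.append_assoc]

theorem pvALoop_false (lines : List String) :
    pvALoop lines false [] =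
      (pvSkipHeader lines).filter (fun l => !PySem.Str.startswith l "#!") := by
  induction lines with
  | nil => simp [pvALoop, pvSkipHeader]
  | cons l rest ih =>
    by_cases h1 : PySem.Chars.startswith l.toList ['#', '!'] = true
    · have h2 := pv_shebang_hash l (by simpa using h1)
      simp only [PySem.Str.startswith_eq, show ("#" : String).toList = ['#'] from rfl] at h2
      simp [pvALoop, pvSkipHeader, h1, h2, ih]
    · by_cases h2 : PySem.Chars.startswith l.toList ['#'] = true
      · simp [pvALoop, pvSkipHeader, h1, h2, ih]
      · by_cases h3 : (PySem.Str.strip l == "") = true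
        · simp [pvALoop, pvSkipHeader, h1, h2, h3, ih]
        · simp [pvALoop, pvSkipHeader, h1, h2, h3, pvALoop_true]

-- ===== VERDICT (by name: the statement is the Claim_ definition above) =====
theorem extract_aops_logic_py_spec : Claim_equal_extract_aops_logic_py := by
  intro hook_content _
  show _ = _
  unfold extract_aops_logic_py extract_aops_logic_py_alt
  rw [pvALoop_false]
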